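-- pv_equiv track=rewrite | github.com/ksugahar/circuit-converter | src/circuit_recognizer.py | _extract_netlist_text
-- ===== SOURCE A (Python) =====
-- def _extract_netlist_text(response: str) -> str:
--     """応答テキストからSPICEネットリスト部分を抽出"""
--     lines = response.strip().split('\n')
--     netlist_lines = []
--     in_netlist = False
--     in_code_block = False
--
--     for line in lines:
--         clean = line.strip()
--
--         # コードブロックの開始/終了
--         if clean.startswith('```'):
--             in_code_block = not in_code_block
--             continue
--
--         # ネットリスト開始: * で始まる行
--         if clean.startswith('*') and not in_netlist:
--             in_netlist = True
--
--         # コンポーネント行（R, C, L, V, I, D, Q, M, .で始まる）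
--         if not in_netlist and clean and clean[0] in 'RCLVIDQMrcldiqm.':
--             in_netlist = True
--
--         if in_netlist:
--             netlist_lines.append(clean)
--             if clean.lower() == '.end':
--                 break
--
--     result = '\n'.join(netlist_lines)
--
--     # .end がなければ追加
--     if not result.lower().endswith('.end'):
--         result += '\n.end'
--
--     return result
-- ===== SOURCE B (Python) =====
-- def _extract_netlist_text(response: str) -> str:
--     """Two-phase: locate the first netlist line among the cleaned lines, then collect."""
--     cleaned = [s for s in (ln.strip() for ln in response.strip().split('\n'))
--                if not s.startswith('```')]
--     start = next((i for i, s in enumerate(cleaned)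
--                   if s and s[0] in '*RCLVIDQMrcldiqm.'), None)
--     collected = []
--     if start is not None:
--         for s in cleaned[start:]:
--             collected.append(s)
--             if s.lower() == '.end':
--                 break
--     result = '\n'.join(collected)
--     if not result.lower().endswith('.end'):
--         result += '\n.end'
--     return result
-- ===== Notes on version B (the rewrite author's own statement) =====
-- stated objective: alternative
-- what changed: A threads an in_netlist flag (plus a dead code-block flag) through one merged loop; B separates the work into locate-then-collect: clean and filter the lines once, find the index of the first netlist-starting line, then collect from that index until the case-insensitive end directive.
import Mathlib
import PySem

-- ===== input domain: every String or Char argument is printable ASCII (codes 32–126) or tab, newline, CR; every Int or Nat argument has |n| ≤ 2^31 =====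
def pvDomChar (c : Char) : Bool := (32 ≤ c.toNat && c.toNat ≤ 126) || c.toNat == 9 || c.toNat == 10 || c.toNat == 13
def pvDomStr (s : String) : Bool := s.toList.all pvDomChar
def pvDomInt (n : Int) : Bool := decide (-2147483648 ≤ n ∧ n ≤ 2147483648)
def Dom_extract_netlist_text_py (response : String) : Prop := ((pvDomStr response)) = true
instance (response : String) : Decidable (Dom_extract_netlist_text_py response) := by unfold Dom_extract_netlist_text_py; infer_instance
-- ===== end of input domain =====

-- B replaces A's single flag-threading loop by a locate-then-collect decomposition
-- (clean/filter the lines once, find the first netlist line, collect until '.end'); same cost.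

-- ===== PORT A =====

-- A's loop over the raw lines, threading (in_netlist, in_code_block, acc); break on '.end'.
def pvALoop : List (List Char) → Bool → Bool → List (List Char) → List (List Char)
  | [], _, _, acc => acc.reverse
  | l :: rest, inN, inC, acc =>
    let clean := PySem.Chars.strip l
    if PySem.Chars.startswith clean ['`','`','`'] then
      pvALoop rest inN (!inC) acc
    else
      let inN1 := if PySem.Chars.startswith clean ['*'] && !inN then true else inN
      let inN2 := if !inN1 && !clean.isEmpty &&
          (match clean with
           | c :: _ => ['R','C','L','V','I','D','Q','M','r','c','l','d','i','q','m','.'].contains c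
           | [] => false) then true else inN1
      if inN2 then
        if PySem.Chars.lower clean = ['.','e','n','d'] then (clean :: acc).reverse
        else pvALoop rest inN2 inC (clean :: acc)
      else pvALoop rest inN2 inC acc

def extract_netlist_text_py (response : String) : String :=
  let lines := PySem.Chars.splitOn (PySem.Chars.strip response.toList) ['\n']
  let netlist := pvALoop lines false false []
  let result := PySem.Chars.join ['\n'] netlist
  if !(PySem.Chars.endswith (PySem.Chars.lower result) ['.','e','n','d']) then
    String.ofList (result ++ ['\n','.','e','n','d'])
  else String.ofList result

-- ===== PORT B =====

-- a netlist line starts: nonempty and first char in '*RCLVIDQMrcldiqm.'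
def pvIsStart (s : List Char) : Bool :=
  match s with
  | c :: _ => ['*','R','C','L','V','I','D','Q','M','r','c','l','d','i','q','m','.'].contains c
  | [] => false

-- phase 2: append each line, break after a case-insensitive '.end'
def pvCollect : List (List Char) → List (List Char)
  | [] => []
  | s :: rest =>
    if PySem.Chars.lower s = ['.','e','n','d'] then [s]
    else s :: pvCollect rest

-- the cleaned lines: each line stripped, '```' fences dropped
def pvCleaned (ls : List (List Char)) : List (List Char) :=
  ls.filterMap (fun l =>
    let s := PySem.Chars.strip l
    if PySem.Chars.startswith s ['`','`','`'] then none else some s)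

def extract_netlist_text_py_alt (response : String) : String :=
  let cleaned := pvCleaned (PySem.Chars.splitOn (PySem.Chars.strip response.toList) ['\n'])
  let collected := match cleaned.findIdx? pvIsStart with
    | none => []
    | some i => pvCollect (cleaned.drop i)
  let result := PySem.Chars.join ['\n'] collected
  if !(PySem.Chars.endswith (PySem.Chars.lower result) ['.','e','n','d']) then
    String.ofList (result ++ ['\n','.','e','n','d'])
  else String.ofList result

-- ===== PRECONDITION & SPEC =====
def Spec_extract_netlist_text_py (response : String) (out : String) : Prop := out = extract_netlist_text_py_alt response
instance (response : String) (out : String) : Decidable (Spec_extract_netlist_text_py response out) := by unfold Spec_extract_netlist_text_py; infer_instance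

-- ===== CLAIM (what is proved, stated in full; the proofs are below) =====
def Claim_equal_extract_netlist_text_py : Prop := ∀ (response : String), Dom_extract_netlist_text_py response → Spec_extract_netlist_text_py response (extract_netlist_text_py response)

-- ===== LEMMAS AND PROOFS =====

-- proof helper: A's loop restricted to already-cleaned lines (no stripping, no fence check),
-- with its in_netlist update written as 'inN || pvIsStart s' (pvCond_eq justifies this below)
def pvALoopC : List (List Char) → Bool → List (List Char) → List (List Char)
  | [], _, acc => acc.reverse
  | s :: rest, inN, acc =>
    let inN2 := inN || pvIsStart s
    if inN2 then
      if PySem.Chars.lower s = ['.','e','n','d'] then (s :: acc).reverse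
      else pvALoopC rest inN2 (s :: acc)
    else pvALoopC rest inN2 acc

-- A's two-step in_netlist update equals 'inN || pvIsStart s'
set_option maxRecDepth 8000 in
theorem pvCond_eq (s : List Char) (inN : Bool) :
    (if !(if PySem.Chars.startswith s ['*'] && !inN then true else inN) && !s.isEmpty &&
        (match s with
         | c :: _ => ['R','C','L','V','I','D','Q','M','r','c','l','d','i','q','m','.'].contains c
         | [] => false) then true
     else (if PySem.Chars.startswith s ['*'] && !inN then true else inN)) = (inN || pvIsStart s) := by
  have hsw : ∀ (c : Char) (t : List Char), PySem.Chars.startswith (c :: t) ['*'] = (c == '*') := by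
    intro c t
    simp [PySem.Chars.startswith, List.isPrefixOf, eq_comm]
  cases s with
  | nil => cases inN <;> decide
  | cons c t =>
    simp only [hsw, pvIsStart, List.contains_cons, List.isEmpty_cons]
    cases inN <;> by_cases hc : c = '*' <;> simp [hc] <;>
      (rw [Bool.eq_iff_iff]; simp [hc]; try tauto)

theorem pvCleaned_cons_fence (l : List Char) (rest : List (List Char))
    (h : PySem.Chars.startswith (PySem.Chars.strip l) ['`','`','`'] = true) :
    pvCleaned (l :: rest) = pvCleaned rest := by
  simp [pvCleaned, h]

theorem pvCleaned_cons (l : List Char) (rest : List (List Char))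
    (h : ¬ PySem.Chars.startswith (PySem.Chars.strip l) ['`','`','`'] = true) :
    pvCleaned (l :: rest) = PySem.Chars.strip l :: pvCleaned rest := by
  simp [pvCleaned, h]

-- A's loop equals the cleaned-lines loop on pvCleaned
theorem pvALoop_cleaned (ls : List (List Char)) : ∀ (inN inC : Bool) (acc : List (List Char)),
    pvALoop ls inN inC acc = pvALoopC (pvCleaned ls) inN acc := by
  induction ls with
  | nil => intro inN inC acc; simp [pvALoop, pvCleaned, pvALoopC]
  | cons l rest ih =>
    intro inN inC acc
    by_cases h : PySem.Chars.startswith (PySem.Chars.strip l) ['`','`','`'] = true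
    · rw [pvCleaned_cons_fence l rest h]
      simp only [pvALoop, h, if_pos]
      exact ih inN (!inC) acc
    · rw [pvCleaned_cons l rest h]
      simp only [pvALoop, pvALoopC, h, Bool.false_eq_true, if_false]
      rw [pvCond_eq]
      split_ifs <;> first | rfl | exact ih ..

-- the collecting phase (in_netlist = true) is pvCollect
theorem pvALoopC_true (cs : List (List Char)) : ∀ (acc : List (List Char)),
    pvALoopC cs true acc = acc.reverse ++ pvCollect cs := by
  induction cs with
  | nil => intro acc; simp [pvALoopC, pvCollect]
  | cons s rest ih =>
    intro acc
    simp only [pvALoopC, pvCollect, Bool.true_or, if_pos]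
    split_ifs with h
    · simp
    · simp [ih]

-- A's loop from in_netlist = false is B's find-then-collect
theorem pvALoopC_main (cs : List (List Char)) :
    pvALoopC cs false [] =
      (match cs.findIdx? pvIsStart with
       | none => []
       | some i => pvCollect (cs.drop i)) := by
  induction cs with
  | nil => simp [pvALoopC]
  | cons s rest ih =>
    rw [List.findIdx?_cons]
    simp only [pvALoopC, Bool.false_or]
    by_cases hs : pvIsStart s = true
    · rw [if_pos hs, if_pos hs, hs]
      by_cases he : PySem.Chars.lower s = ['.','e','n','d']
      · rw [if_pos he]; simp [pvCollect, he]
      · rw [if_neg he, pvALoopC_true]; simp [pvCollect, he]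
    · have hs' : pvIsStart s = false := by simpa using hs
      rw [hs']
      simp only [Bool.false_eq_true, if_false, ih]
      cases hfind : rest.findIdx? pvIsStart with
      | none => simp
      | some i => simp [List.drop_succ_cons]

-- ===== VERDICT (by name: the statement is the Claim_ definition above) =====
theorem extract_netlist_text_py_spec : Claim_equal_extract_netlist_text_py := by
  intro response _
  unfold Spec_extract_netlist_text_py extract_netlist_text_py extract_netlist_text_py_alt
  simp only [pvALoop_cleaned, pvALoopC_main]
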